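-- pv_equiv track=rewrite | github.com/Chobshaw/chob_tools | chob_tools/algorithms/topological_sort.py | _prepare_graph
-- ===== SOURCE A (Python) =====
-- from collections import defaultdict, deque
-- from collections.abc import Mapping, Iterable, Iterator
-- from typing import Any, Literal, Optional, TypeVar, get_args
--
-- NT = TypeVar('NT')
--
-- def _prepare_graph(
--     graph: Mapping[NT, Iterable[NT]]
-- ) -> tuple[dict[NT, list[NT]], defaultdict[NT, int]]:
--     new_graph = {}
--     indegree = defaultdict(int)
--     for node, neighbours in graph.items():
--         new_graph[node] = []
--         for neighbour in neighbours:
--             if neighbour == node: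
--                 continue
--             if neighbour not in graph:
--                 new_graph[neighbour] = []
--             new_graph[node].append(neighbour)
--             indegree[neighbour] += 1
--     return new_graph, indegree
-- ===== SOURCE B (Python) =====
-- from collections import defaultdict, Counter
--
--
-- def _prepare_graph(graph):
--     # Stage 1: compute only the ORDER of the output keys: each graph key at its
--     # own position, with never-seen non-key neighbours interleaved at first
--     # occurrence (self-loops ignored).
--     keys = []
--     seen = set(graph)
--     for node, neighbours in graph.items():
--         keys.append(node)
--         for nb in neighbours:
--             if nb != node and nb not in seen:
--                 seen.add(nb)
--                 keys.append(nb)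
--     # Stage 2: the whole table by one comprehension over that key order.
--     new_graph = {k: [nb for nb in graph.get(k, []) if nb != k] for k in keys}
--     # Stage 3: indegrees are just a multiset count of the non-self-loop edges.
--     edges = [nb for node, nbs in graph.items() for nb in nbs if nb != node]
--     indegree = defaultdict(int, Counter(edges))
--     return new_graph, indegree
-- ===== Notes on version B (the rewrite author's own statement) =====
-- stated objective: alternative
-- what changed: Replaces A's single mutating loop (which grows the dict and the indegree counter edge by edge) with three independent stages: a seen-set pass that computes only the ordered key sequence, a dict comprehension over that sequence that produces every adjacency list in one shot from graph.get, and collections.Counter over the flattened filtered edge list for the indegrees; nothing is appended or incremented into the result dicts.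
import Mathlib
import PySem

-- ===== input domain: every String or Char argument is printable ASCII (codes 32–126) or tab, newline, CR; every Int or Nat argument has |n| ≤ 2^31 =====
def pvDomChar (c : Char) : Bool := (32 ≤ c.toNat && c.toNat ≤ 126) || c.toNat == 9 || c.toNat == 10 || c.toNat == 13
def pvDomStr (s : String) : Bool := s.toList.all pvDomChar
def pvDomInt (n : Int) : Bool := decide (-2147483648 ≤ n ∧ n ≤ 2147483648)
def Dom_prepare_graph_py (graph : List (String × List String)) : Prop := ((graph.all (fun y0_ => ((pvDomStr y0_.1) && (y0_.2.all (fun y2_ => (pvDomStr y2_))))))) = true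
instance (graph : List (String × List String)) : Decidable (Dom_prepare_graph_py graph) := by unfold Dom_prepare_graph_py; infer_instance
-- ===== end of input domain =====

-- B replaces A's single mutating loop by three independent stages (key order via a
-- seen set, the table by one comprehension over that order, indegrees via Counter
-- on the filtered edge list) — same cost, a different algorithmic decomposition;
-- return-value equivalence only (neither side mutates its argument).

-- ===== PORT A =====
-- A: one fused loop over graph.items() that builds new_graph and indegree together.
def prepare_graph_py (graph : List (String × List String)) :
    (List (String × List String)) × (List (String × Int)) :=
  let g : PySem.Dict String (List String) := PySem.Dict.mk graph
  let st :=
    graph.foldl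
      (fun (st : PySem.Dict String (List String) × PySem.Dict String Int) p =>
        p.2.foldl
          (fun st nb =>
            if nb == p.1 then st
            else
              ((if g.contains nb then st.1 else st.1.insert nb []).modify p.1 []
                  (fun l => l ++ [nb]),
               st.2.modify nb 0 (fun c => c + 1)))
          (st.1.insert p.1 [], st.2))
      (PySem.Dict.mk [], PySem.Dict.mk [])
  (st.1.items, st.2.items)

-- ===== PORT B =====
def prepare_graph_py_alt (graph : List (String × List String)) :
    (List (String × List String)) × (List (String × Int)) :=
  let g : PySem.Dict String (List String) := PySem.Dict.mk graph
  -- Stage 1: only the ordered key sequence (keys, seen).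
  let st :=
    graph.foldl
      (fun (st : List String × PySem.Set String) p =>
        p.2.foldl
          (fun st nb =>
            if nb != p.1 && !(PySem.Set.contains st.2 nb) then
              (st.1 ++ [nb], PySem.Set.add st.2 nb)
            else st)
          (st.1 ++ [p.1], st.2))
      ([], PySem.Set.ofList (graph.map Prod.fst))
  -- Stage 2: the whole table by one comprehension over that key order.
  let new_graph :=
    st.1.foldl
      (fun (d : PySem.Dict String (List String)) k =>
        d.insert k ((g.getD k []).filter (fun nb => nb != k)))
      (PySem.Dict.mk [])
  -- Stage 3: Counter of the flattened filtered edge list.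
  let edges := graph.flatMap (fun p => p.2.filter (fun nb => nb != p.1))
  let indegree : PySem.Dict String Int := PySem.Dict.counter edges
  (new_graph.items, indegree.items)

-- ===== PRECONDITION & SPEC =====
-- graph is a Python dict, whose keys are necessarily distinct; Pre_ only rules out
-- assoc lists with duplicate keys, which no Python caller of A can ever pass.
def Pre_prepare_graph_py (graph : List (String × List String)) : Prop :=
  (graph.map Prod.fst).Nodup
instance (graph : List (String × List String)) : Decidable (Pre_prepare_graph_py graph) := by
  unfold Pre_prepare_graph_py; infer_instance

def pvWitness_prepare_graph_py : (List (String × List String)) :=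
  [("a", ["b", "c", "a"]), ("b", ["c"])]

def Spec_prepare_graph_py (graph : List (String × List String)) (out : (List (String × List String)) × (List (String × Int))) : Prop := out = prepare_graph_py_alt graph
instance (graph : List (String × List String)) (out : (List (String × List String)) × (List (String × Int))) : Decidable (Spec_prepare_graph_py graph out) := by unfold Spec_prepare_graph_py; infer_instance

-- ===== CLAIM (what is proved, stated in full; the proofs are below) =====
def Claim_equal_prepare_graph_py : Prop := ∀ (graph : List (String × List String)), Dom_prepare_graph_py graph → Pre_prepare_graph_py graph → Spec_prepare_graph_py graph (prepare_graph_py graph)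

-- ===== LEMMAS AND PROOFS =====

-- The sequence of counted edges: all neighbours, in input order, minus self-loops.
def pvEdges (graph : List (String × List String)) : List String :=
  graph.flatMap (fun p => p.2.filter (fun nb => nb != p.1))

-- The final value of a key's table entry, computed the way B's comprehension does.
def pvVal (graph : List (String × List String)) (k : String) : String × List String :=
  (k, ((PySem.Dict.mk graph).getD k []).filter (fun nb => nb != k))

theorem pvVal_fst (graph : List (String × List String)) (k : String) :
    (pvVal graph k).1 = k := rfl

theorem pvMkContains {ν : Type} (m : List (String × ν)) (x : String) :
    (PySem.Dict.mk m).contains x = true ↔ x ∈ m.map Prod.fst := by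
  simp only [PySem.Dict.contains, List.any_eq_true, List.mem_map]
  constructor
  · rintro ⟨q, hq, hqe⟩; exact ⟨q, hq, beq_iff_eq.mp hqe⟩
  · rintro ⟨q, hq, hqe⟩; exact ⟨q, hq, beq_iff_eq.mpr hqe⟩

-- A's inner loop over one neighbour list splits into the table step and a
-- plain increment fold over the filtered neighbours.
theorem pvA_inner_split (g : PySem.Dict String (List String)) (node : String) :
    ∀ (nbs : List String) (st : PySem.Dict String (List String) × PySem.Dict String Int),
      nbs.foldl
        (fun st nb =>
          if nb == node then st
          else
            ((if g.contains nb then st.1 else st.1.insert nb []).modify node []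
                (fun l => l ++ [nb]),
             st.2.modify nb 0 (fun c => c + 1))) st
      = (nbs.foldl
          (fun ng nb =>
            if nb == node then ng
            else
              (if g.contains nb then ng else ng.insert nb []).modify node []
                (fun l => l ++ [nb])) st.1,
         (nbs.filter (fun nb => nb != node)).foldl
           (fun d nb => d.modify nb 0 (fun c => c + 1)) st.2) := by
  intro nbs
  induction nbs with
  | nil => intro st; rfl
  | cons nb nbs ih =>
    intro st
    rw [List.foldl_cons, List.foldl_cons, List.filter_cons]
    by_cases h : nb == node
    · simp only [h, bne, Bool.not_true, if_true]
      exact ih _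
    · simp only [h, bne, Bool.not_false, ite_false, Bool.false_eq_true]
      exact ih _

-- A's whole fold splits into the table-only fold and an increment fold over pvEdges.
theorem pvA_split (g : PySem.Dict String (List String)) :
    ∀ (l : List (String × List String)) (ng : PySem.Dict String (List String))
      (ind : PySem.Dict String Int),
      l.foldl
        (fun (st : PySem.Dict String (List String) × PySem.Dict String Int) p =>
          p.2.foldl
            (fun st nb =>
              if nb == p.1 then st
              else
                ((if g.contains nb then st.1 else st.1.insert nb []).modify p.1 []
                    (fun l => l ++ [nb]),
                 st.2.modify nb 0 (fun c => c + 1)))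
            (st.1.insert p.1 [], st.2)) (ng, ind)
      = (l.foldl
          (fun ng p =>
            p.2.foldl
              (fun ng nb =>
                if nb == p.1 then ng
                else
                  (if g.contains nb then ng else ng.insert nb []).modify p.1 []
                    (fun l => l ++ [nb]))
              (ng.insert p.1 [])) ng,
         (pvEdges l).foldl (fun d nb => d.modify nb 0 (fun c => c + 1)) ind) := by
  intro l
  induction l with
  | nil => intro ng ind; rfl
  | cons p l ih =>
    intro ng ind
    simp only [List.foldl_cons, pvA_inner_split g p.1 p.2, ih, pvEdges, List.flatMap_cons,
      List.foldl_append]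

theorem pvModify_shape (pre post : List (String × List String)) (node : String)
    (acc : List String) (f : List String → List String)
    (hpre : node ∉ pre.map Prod.fst) (hpost : node ∉ post.map Prod.fst) :
    ((PySem.Dict.mk (pre ++ (node, acc) :: post)).modify node [] f).items
      = pre ++ (node, f acc) :: post := by
  have hfpre : List.find? (fun p => p.1 == node) pre = none := by
    rw [List.find?_eq_none]
    intro q hq
    simp only [beq_iff_eq]
    exact fun h => hpre (h ▸ List.mem_map_of_mem hq)
  have hfind : List.find? (fun p => p.1 == node) (pre ++ (node, acc) :: post)
      = some (node, acc) := by
    rw [List.find?_append, hfpre]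
    simp
  have hcont : (PySem.Dict.mk (pre ++ (node, acc) :: post)).contains node = true := by
    simp only [PySem.Dict.contains, List.any_eq_true]
    exact ⟨(node, acc), by simp⟩
  have hmap : ∀ (l : List (String × List String)), node ∉ l.map Prod.fst →
      l.map (fun p => if (p.1 == node) = true then (node, f acc) else p) = l := by
    intro l hl
    induction l with
    | nil => rfl
    | cons a l ihl =>
      simp only [List.map_cons, List.mem_cons, not_or] at hl ⊢
      have ha : (a.1 == node) = false := by
        simp only [beq_eq_false_iff_ne, ne_eq]
        exact fun h => hl.1 (by exact h ▸ rfl)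
      rw [ha]
      simp only [Bool.false_eq_true, if_false]
      rw [ihl hl.2]
  unfold PySem.Dict.modify
  have hgetD : (PySem.Dict.mk (pre ++ (node, acc) :: post)).getD node [] = acc := by
    simp [PySem.Dict.getD, PySem.Dict.get?, hfind]
  rw [hgetD, PySem.Dict.items_insert_of_contains _ _ hcont]
  show List.map (fun p => if (p.1 == node) = true then (node, f acc) else p) _ = _
  rw [List.map_append, List.map_cons, hmap pre hpre, hmap post hpost]
  simp

theorem pvInsert_present_same (m : List (String × List String)) (nb : String)
    (hnd : (m.map Prod.fst).Nodup) (hmem : (nb, ([] : List String)) ∈ m) :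
    ((PySem.Dict.mk m).insert nb ([] : List String)).items = m := by
  have hcont : (PySem.Dict.mk m).contains nb = true := by
    simp only [PySem.Dict.contains, List.any_eq_true]
    exact ⟨(nb, []), hmem, by simp⟩
  have key : ∀ (l : List (String × List String)), (l.map Prod.fst).Nodup →
      (nb, ([] : List String)) ∈ l → ∀ q ∈ l, (q.1 == nb) = true →
      q = (nb, ([] : List String)) := by
    intro l
    induction l with
    | nil => intro _ h; cases h
    | cons a l ihl =>
      intro hnd' hmem' q hq hqe
      rw [List.map_cons, List.nodup_cons] at hnd'
      obtain ⟨hka, hnd2⟩ := hnd'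
      have h1 : q.1 = nb := beq_iff_eq.mp hqe
      rcases List.mem_cons.mp hq with rfl | hqm
      · rcases List.mem_cons.mp hmem' with h | h
        · exact h.symm
        · have : q.1 ∈ l.map Prod.fst := by
            rw [h1]; exact List.mem_map_of_mem h
          exact absurd this hka
      · rcases List.mem_cons.mp hmem' with h | h
        · have hqmem : q.1 ∈ l.map Prod.fst := List.mem_map_of_mem hqm
          rw [h1] at hqmem
          have ha1 : a.1 = nb := by rw [← h]
          rw [ha1] at hka
          exact absurd hqmem hka
        · exact ihl hnd2 h q hqm hqe
  rw [PySem.Dict.items_insert_of_contains _ _ hcont]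
  show List.map (fun p => if (p.1 == nb) = true then (nb, ([] : List String)) else p) _ = _
  have : ∀ q ∈ m, (fun p => if (p.1 == nb) = true then (nb, ([] : List String)) else p) q = id q := by
    intro q hq
    by_cases h : (q.1 == nb) = true
    · simp only [h, if_true, id_eq]
      exact (key m hnd hmem q hq h).symm
    · simp [h]
  rw [List.map_congr_left this, List.map_id]

theorem pvSetContains (s : PySem.Set String) (x : String) :
    PySem.Set.contains s x = true ↔ x ∈ s := by
  simp [PySem.Set.contains]

theorem pvMapFst (graph : List (String × List String)) (l : List String) :
    (l.map (pvVal graph)).map Prod.fst = l := by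
  simp [List.map_map, Function.comp_def, pvVal_fst]

-- Simulation of one neighbour list: A's table step keeps the dict equal to the
-- pvVal image of B's key list (with node's entry mid-accumulation).
theorem pvInner (graph : List (String × List String)) (node : String) :
    ∀ (nbs klpre klpost acc : List String) (seen : PySem.Set String),
      node ∉ klpre → node ∉ klpost → (klpre ++ node :: klpost).Nodup →
      (∀ x, x ∈ seen ↔ (x ∈ graph.map Prod.fst ∨ x ∈ klpre ++ node :: klpost)) →
      ∃ newkl : List String,
        (nbs.foldl
            (fun (st : List String × PySem.Set String) nb =>
              if nb != node && !(PySem.Set.contains st.2 nb) then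
                (st.1 ++ [nb], PySem.Set.add st.2 nb)
              else st)
            (klpre ++ node :: klpost, seen)).1 = klpre ++ node :: (klpost ++ newkl)
        ∧ (nbs.foldl
            (fun ng nb =>
              if nb == node then ng
              else
                (if (PySem.Dict.mk graph).contains nb then ng else ng.insert nb []).modify
                  node [] (fun l => l ++ [nb]))
            (PySem.Dict.mk (klpre.map (pvVal graph) ++ (node, acc) :: klpost.map (pvVal graph)))).items
            = klpre.map (pvVal graph)
                ++ (node, acc ++ nbs.filter (fun nb => nb != node))
                  :: (klpost ++ newkl).map (pvVal graph)
        ∧ (∀ x ∈ newkl, (PySem.Dict.mk graph).contains x = false)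
        ∧ (klpre ++ node :: (klpost ++ newkl)).Nodup
        ∧ (∀ x, x ∈ (nbs.foldl
            (fun (st : List String × PySem.Set String) nb =>
              if nb != node && !(PySem.Set.contains st.2 nb) then
                (st.1 ++ [nb], PySem.Set.add st.2 nb)
              else st)
            (klpre ++ node :: klpost, seen)).2
            ↔ (x ∈ graph.map Prod.fst ∨ x ∈ klpre ++ node :: (klpost ++ newkl))) := by
  intro nbs
  induction nbs with
  | nil =>
    intro klpre klpost acc seen hnpre hnpost hnd hseen
    refine ⟨[], by simp, by simp, by simp, by simpa using hnd, by simpa using hseen⟩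
  | cons nb nbs ihn =>
    intro klpre klpost acc seen hnpre hnpost hnd hseen
    rw [List.foldl_cons, List.foldl_cons, List.filter_cons]
    by_cases h : nb = node
    · subst h
      simp only [beq_self_eq_true, if_true, bne_self_eq_false, Bool.false_and,
        Bool.false_eq_true, if_false]
      exact ihn klpre klpost acc seen hnpre hnpost hnd hseen
    · have hbeq : (nb == node) = false := beq_eq_false_iff_ne.mpr h
      have hbne : (nb != node) = true := by simp [bne, hbeq]
      simp only [hbeq, Bool.false_eq_true, if_false, hbne, Bool.true_and]
      have hpreF : node ∉ (klpre.map (pvVal graph)).map Prod.fst := by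
        rw [pvMapFst]; exact hnpre
      by_cases hg : (PySem.Dict.mk graph).contains nb = true
      · -- neighbour is a key of the input graph: A only appends; B's seen test skips
        have hsc : PySem.Set.contains seen nb = true :=
          (pvSetContains seen nb).mpr ((hseen nb).mpr (Or.inl ((pvMkContains graph nb).mp hg)))
        simp only [hg, if_true, hsc, Bool.not_true, Bool.false_eq_true, if_false]
        have hpostF : node ∉ (klpost.map (pvVal graph)).map Prod.fst := by
          rw [pvMapFst]; exact hnpost
        have hmod : (PySem.Dict.mk (klpre.map (pvVal graph)
              ++ (node, acc) :: klpost.map (pvVal graph))).modify node [] (fun l => l ++ [nb])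
            = PySem.Dict.mk (klpre.map (pvVal graph)
              ++ (node, acc ++ [nb]) :: klpost.map (pvVal graph)) :=
          congrArg PySem.Dict.mk
            (pvModify_shape (klpre.map (pvVal graph)) (klpost.map (pvVal graph)) node acc
              (fun l => l ++ [nb]) hpreF hpostF)
        rw [hmod]
        obtain ⟨newkl, b1, a1, c1, d1, e1⟩ := ihn klpre klpost (acc ++ [nb]) seen hnpre hnpost hnd hseen
        refine ⟨newkl, b1, ?_, c1, d1, e1⟩
        rw [a1]; simp
      · have hgf : (PySem.Dict.mk graph).contains nb = false := Bool.eq_false_iff.mpr hg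
        have hnbg : nb ∉ graph.map Prod.fst := fun hx => hg ((pvMkContains graph nb).mpr hx)
        have hnbval : pvVal graph nb = (nb, []) := by
          have hgd : (PySem.Dict.mk graph).getD nb ([] : List String) = [] :=
            PySem.Dict.getD_of_not_contains _ ([] : List String) hgf
          simp [pvVal, hgd]
        simp only [hgf, Bool.false_eq_true, if_false]
        have hmapfst : ((klpre.map (pvVal graph)
            ++ (node, acc) :: klpost.map (pvVal graph)).map Prod.fst)
            = klpre ++ node :: klpost := by
          simp only [List.map_append, List.map_cons, pvMapFst]
        by_cases hmem : nb ∈ klpre ++ node :: klpost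
        · -- already a (non-key) entry: the insert is a no-op, the seen test skips
          have hsc : PySem.Set.contains seen nb = true :=
            (pvSetContains seen nb).mpr ((hseen nb).mpr (Or.inr hmem))
          simp only [hsc, Bool.not_true, Bool.false_eq_true, if_false]
          have hmemF : (nb, ([] : List String)) ∈ klpre.map (pvVal graph)
              ++ (node, acc) :: klpost.map (pvVal graph) := by
            rcases List.mem_append.mp hmem with h' | h'
            · exact List.mem_append.mpr (Or.inl (hnbval ▸ List.mem_map_of_mem h'))
            · rcases List.mem_cons.mp h' with rfl | h''
              · exact absurd rfl h
              · exact List.mem_append.mpr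
                  (Or.inr (List.mem_cons_of_mem _ (hnbval ▸ List.mem_map_of_mem h'')))
          have hndF : ((klpre.map (pvVal graph)
              ++ (node, acc) :: klpost.map (pvVal graph)).map Prod.fst).Nodup := by
            rw [hmapfst]; exact hnd
          have hsame : (PySem.Dict.mk (klpre.map (pvVal graph)
                ++ (node, acc) :: klpost.map (pvVal graph))).insert nb []
              = PySem.Dict.mk (klpre.map (pvVal graph)
                ++ (node, acc) :: klpost.map (pvVal graph)) :=
            congrArg PySem.Dict.mk (pvInsert_present_same _ nb hndF hmemF)
          rw [hsame]
          have hpostF : node ∉ (klpost.map (pvVal graph)).map Prod.fst := by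
            rw [pvMapFst]; exact hnpost
          have hmod : (PySem.Dict.mk (klpre.map (pvVal graph)
                ++ (node, acc) :: klpost.map (pvVal graph))).modify node [] (fun l => l ++ [nb])
              = PySem.Dict.mk (klpre.map (pvVal graph)
                ++ (node, acc ++ [nb]) :: klpost.map (pvVal graph)) :=
            congrArg PySem.Dict.mk
              (pvModify_shape (klpre.map (pvVal graph)) (klpost.map (pvVal graph)) node acc
                (fun l => l ++ [nb]) hpreF hpostF)
          rw [hmod]
          obtain ⟨newkl, b1, a1, c1, d1, e1⟩ :=
            ihn klpre klpost (acc ++ [nb]) seen hnpre hnpost hnd hseen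
          refine ⟨newkl, b1, ?_, c1, d1, e1⟩
          rw [a1]; simp
        · -- brand-new neighbour: A appends a fresh empty entry, B appends to keys/seen
          have hsc : PySem.Set.contains seen nb = false := by
            rw [Bool.eq_false_iff]
            intro hx
            rcases (hseen nb).mp ((pvSetContains seen nb).mp hx) with h' | h'
            · exact hnbg h'
            · exact hmem h'
          simp only [hsc, Bool.not_false, if_true]
          have hmf : (PySem.Dict.mk (klpre.map (pvVal graph)
              ++ (node, acc) :: klpost.map (pvVal graph))).contains nb = false := by
            rw [Bool.eq_false_iff]
            intro hx
            exact hmem (hmapfst ▸ (pvMkContains _ nb).mp hx)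
          have hitems := PySem.Dict.items_insert_of_not_contains
            (PySem.Dict.mk (klpre.map (pvVal graph)
              ++ (node, acc) :: klpost.map (pvVal graph))) ([] : List String) hmf
          have hitems2 : ((PySem.Dict.mk (klpre.map (pvVal graph)
              ++ (node, acc) :: klpost.map (pvVal graph))).insert nb []).items
              = klpre.map (pvVal graph)
                ++ (node, acc) :: (klpost ++ [nb]).map (pvVal graph) := by
            rw [hitems]; simp [hnbval]
          have hinsA : (PySem.Dict.mk (klpre.map (pvVal graph)
                ++ (node, acc) :: klpost.map (pvVal graph))).insert nb []
              = PySem.Dict.mk (klpre.map (pvVal graph)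
                ++ (node, acc) :: (klpost ++ [nb]).map (pvVal graph)) :=
            congrArg PySem.Dict.mk hitems2
          rw [hinsA]
          have hnpost' : node ∉ klpost ++ [nb] := by
            simp only [List.mem_append, List.mem_singleton, not_or]
            exact ⟨hnpost, fun hx => h hx.symm⟩
          have hpostF' : node ∉ ((klpost ++ [nb]).map (pvVal graph)).map Prod.fst := by
            rw [pvMapFst]; exact hnpost'
          have hmod : (PySem.Dict.mk (klpre.map (pvVal graph)
                ++ (node, acc) :: (klpost ++ [nb]).map (pvVal graph))).modify node []
                  (fun l => l ++ [nb])
              = PySem.Dict.mk (klpre.map (pvVal graph)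
                ++ (node, acc ++ [nb]) :: (klpost ++ [nb]).map (pvVal graph)) :=
            congrArg PySem.Dict.mk
              (pvModify_shape (klpre.map (pvVal graph)) ((klpost ++ [nb]).map (pvVal graph))
                node acc (fun l => l ++ [nb]) hpreF hpostF')
          rw [hmod]
          have hassoc : (klpre ++ node :: klpost) ++ [nb]
              = klpre ++ node :: (klpost ++ [nb]) := by simp
          rw [hassoc]
          have hnd' : (klpre ++ node :: (klpost ++ [nb])).Nodup := by
            rw [← hassoc]
            have hdisj : List.Disjoint (klpre ++ node :: klpost) [nb] := by
              intro a ha hb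
              rw [List.mem_singleton] at hb
              subst hb
              exact hmem ha
            exact List.Nodup.append hnd (List.nodup_singleton _) hdisj
          have hseen' : ∀ x, x ∈ PySem.Set.add seen nb
              ↔ (x ∈ graph.map Prod.fst ∨ x ∈ klpre ++ node :: (klpost ++ [nb])) := by
            intro x
            rw [PySem.Set.mem_add]
            constructor
            · rintro (hx | rfl)
              · rcases (hseen x).mp hx with h' | h'
                · exact Or.inl h'
                · refine Or.inr ?_
                  rw [← hassoc]
                  exact List.mem_append.mpr (Or.inl h')
              · exact Or.inr (by rw [← hassoc]; simp)
            · rintro (hx | hx)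
              · exact Or.inl ((hseen x).mpr (Or.inl hx))
              · rw [← hassoc] at hx
                rcases List.mem_append.mp hx with h' | h'
                · exact Or.inl ((hseen x).mpr (Or.inr h'))
                · exact Or.inr (List.mem_singleton.mp h')
          obtain ⟨newkl, b1, a1, c1, d1, e1⟩ :=
            ihn klpre (klpost ++ [nb]) (acc ++ [nb]) (PySem.Set.add seen nb)
              hnpre hnpost' hnd' hseen'
          refine ⟨nb :: newkl, ?_, ?_, ?_, ?_, ?_⟩
          · rw [b1]; simp
          · rw [a1]; simp
          · intro x hx
            rcases List.mem_cons.mp hx with rfl | hx'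
            · exact hgf
            · exact c1 x hx'
          · have := d1
            simpa using this
          · intro x
            have := e1 x
            simpa using this

-- Simulation of the whole outer loop: A's table fold lands on the pvVal image of
-- B's key list, and that key list has no duplicates.
theorem pvMain (graph : List (String × List String)) :
    ∀ (l : List (String × List String)) (kl : List String) (seen : PySem.Set String),
      (∀ p ∈ l, p ∈ graph) → (graph.map Prod.fst).Nodup → (l.map Prod.fst).Nodup →
      (∀ p ∈ l, p.1 ∉ kl) → kl.Nodup →
      (∀ x, x ∈ seen ↔ (x ∈ graph.map Prod.fst ∨ x ∈ kl)) →
      (l.foldl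
          (fun ng p =>
            p.2.foldl
              (fun ng nb =>
                if nb == p.1 then ng
                else
                  (if (PySem.Dict.mk graph).contains nb then ng else ng.insert nb []).modify
                    p.1 [] (fun l => l ++ [nb]))
              (ng.insert p.1 []))
          (PySem.Dict.mk (kl.map (pvVal graph)))).items
        = ((l.foldl
            (fun (st : List String × PySem.Set String) p =>
              p.2.foldl
                (fun st nb =>
                  if nb != p.1 && !(PySem.Set.contains st.2 nb) then
                    (st.1 ++ [nb], PySem.Set.add st.2 nb)
                  else st)
                (st.1 ++ [p.1], st.2))
            (kl, seen)).1).map (pvVal graph)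
      ∧ ((l.foldl
            (fun (st : List String × PySem.Set String) p =>
              p.2.foldl
                (fun st nb =>
                  if nb != p.1 && !(PySem.Set.contains st.2 nb) then
                    (st.1 ++ [nb], PySem.Set.add st.2 nb)
                  else st)
                (st.1 ++ [p.1], st.2))
            (kl, seen)).1).Nodup := by
  intro l
  induction l with
  | nil =>
    intro kl seen _ _ _ _ hndkl _
    exact ⟨rfl, hndkl⟩
  | cons p l ih =>
    intro kl seen hl hndg hndl hkn hndkl hseen
    simp only [List.foldl_cons]
    have hpg : p ∈ graph := hl p List.mem_cons_self
    have hp1kl : p.1 ∉ kl := hkn p List.mem_cons_self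
    have hp1g : p.1 ∈ graph.map Prod.fst := List.mem_map_of_mem hpg
    rw [List.map_cons, List.nodup_cons] at hndl
    obtain ⟨hp1l, hndl2⟩ := hndl
    have hfresh : (PySem.Dict.mk (kl.map (pvVal graph))).contains p.1 = false := by
      rw [Bool.eq_false_iff]
      intro hct
      have hmem := (pvMkContains _ _).mp hct
      rw [List.map_map] at hmem
      simp only [Function.comp_def, pvVal_fst, List.map_id'] at hmem
      exact hp1kl hmem
    have hitems := PySem.Dict.items_insert_of_not_contains
      (PySem.Dict.mk (kl.map (pvVal graph))) ([] : List String) hfresh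
    have hitems2 : ((PySem.Dict.mk (kl.map (pvVal graph))).insert p.1 []).items
        = kl.map (pvVal graph)
            ++ (p.1, ([] : List String)) :: ([] : List String).map (pvVal graph) := by
      rw [hitems]; simp
    have hins : (PySem.Dict.mk (kl.map (pvVal graph))).insert p.1 []
        = PySem.Dict.mk (kl.map (pvVal graph)
            ++ (p.1, ([] : List String)) :: ([] : List String).map (pvVal graph)) :=
      congrArg PySem.Dict.mk hitems2
    have hndkl1 : (kl ++ p.1 :: ([] : List String)).Nodup := by
      have hdisj : List.Disjoint kl [p.1] := by
        intro a ha hb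
        rw [List.mem_singleton] at hb
        subst hb
        exact hp1kl ha
      exact List.Nodup.append hndkl (List.nodup_singleton _) hdisj
    have hseen1 : ∀ x, x ∈ seen ↔ (x ∈ graph.map Prod.fst ∨ x ∈ kl ++ p.1 :: ([] : List String)) := by
      intro x
      rw [hseen x]
      constructor
      · rintro (h | h)
        · exact Or.inl h
        · exact Or.inr (by simp [h])
      · rintro (h | h)
        · exact Or.inl h
        · rcases (by simpa using h : x ∈ kl ∨ x = p.1) with h' | rfl
          · exact Or.inr h'
          · exact Or.inl hp1g
    obtain ⟨newkl, hB1, hA, hnewk, hnd', hseen'⟩ :=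
      pvInner graph p.1 p.2 kl [] [] seen hp1kl (by simp) hndkl1 hseen1
    have hget : (PySem.Dict.mk graph).getD p.1 [] = p.2 :=
      PySem.Dict.getD_of_mem_items (PySem.Dict.mk graph)
        (show (p.1, p.2) ∈ graph by simpa using hpg)
        (by simpa [PySem.Dict.keys] using hndg) []
    set st' := p.2.foldl
        (fun (st : List String × PySem.Set String) nb =>
          if nb != p.1 && !(PySem.Set.contains st.2 nb) then
            (st.1 ++ [nb], PySem.Set.add st.2 nb)
          else st)
        (kl ++ [p.1], seen) with hst'
    have hB1' : st'.1 = kl ++ p.1 :: newkl := by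
      rw [hB1]; simp
    have hA2 : (p.2.foldl
        (fun ng nb =>
          if nb == p.1 then ng
          else
            (if (PySem.Dict.mk graph).contains nb then ng else ng.insert nb []).modify
              p.1 [] (fun l => l ++ [nb]))
        (PySem.Dict.mk (kl.map (pvVal graph)
            ++ (p.1, ([] : List String)) :: ([] : List String).map (pvVal graph)))).items
        = st'.1.map (pvVal graph) := by
      rw [hA, hB1']
      simp [pvVal, hget]
    have hdict : p.2.foldl
        (fun ng nb =>
          if nb == p.1 then ng
          else
            (if (PySem.Dict.mk graph).contains nb then ng else ng.insert nb []).modify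
              p.1 [] (fun l => l ++ [nb]))
        (PySem.Dict.mk (kl.map (pvVal graph)
            ++ (p.1, ([] : List String)) :: ([] : List String).map (pvVal graph)))
        = PySem.Dict.mk (st'.1.map (pvVal graph)) :=
      congrArg PySem.Dict.mk hA2
    rw [hins, hdict]
    have hkn' : ∀ q ∈ l, q.1 ∉ st'.1 := by
      intro q hq
      rw [hB1']
      simp only [List.mem_append, List.mem_cons, not_or]
      refine ⟨fun h => hkn q (List.mem_cons_of_mem _ hq) h, ?_, ?_⟩
      · intro h
        exact hp1l (h ▸ List.mem_map_of_mem hq)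
      · intro h
        have hqg : (PySem.Dict.mk graph).contains q.1 = true :=
          (pvMkContains graph q.1).mpr (List.mem_map_of_mem (hl q (List.mem_cons_of_mem _ hq)))
        rw [hnewk q.1 h] at hqg
        cases hqg
    have hnd'' : st'.1.Nodup := by
      rw [hB1']
      simpa using hnd'
    have hseen'' : ∀ x, x ∈ st'.2 ↔ (x ∈ graph.map Prod.fst ∨ x ∈ st'.1) := by
      intro x
      rw [hB1']
      simpa using hseen' x
    obtain ⟨ih1, ih2⟩ := ih st'.1 st'.2 (fun q hq => hl q (List.mem_cons_of_mem _ hq))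
      hndg hndl2 hkn' hnd'' hseen''
    exact ⟨ih1, ih2⟩

-- ===== VERDICT (by name: the statement is the Claim_ definition above) =====
theorem prepare_graph_py_spec : Claim_equal_prepare_graph_py := by
  intro graph _ hpre
  unfold Spec_prepare_graph_py
  unfold Pre_prepare_graph_py at hpre
  simp only [prepare_graph_py, prepare_graph_py_alt]
  rw [pvA_split (PySem.Dict.mk graph) graph (PySem.Dict.mk []) (PySem.Dict.mk [])]
  obtain ⟨heq, hnodup⟩ := pvMain graph graph [] (PySem.Set.ofList (graph.map Prod.fst))
    (fun p hp => hp) hpre hpre (by simp) List.nodup_nil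
    (by intro x; simp [PySem.Set.mem_ofList])
  simp only [List.map_nil] at heq
  have hB := PySem.Dict.items_foldl_insert_fresh
    (l := (graph.foldl
        (fun (st : List String × PySem.Set String) p =>
          p.2.foldl
            (fun st nb =>
              if nb != p.1 && !(PySem.Set.contains st.2 nb) then
                (st.1 ++ [nb], PySem.Set.add st.2 nb)
              else st)
            (st.1 ++ [p.1], st.2))
        ([], PySem.Set.ofList (graph.map Prod.fst))).1)
    (k := fun a => a)
    (v := fun a => ((PySem.Dict.mk graph).getD a []).filter (fun nb => nb != a))
    (d := PySem.Dict.mk [])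
    (by intro a _; rfl) (by simpa using hnodup)
  refine Prod.ext ?_ rfl
  show (graph.foldl _ (PySem.Dict.mk [])).items = _
  rw [heq, hB]
  simp [pvVal]
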